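-- pv_equiv track=rewrite | github.com/chinmaymufasa/mufasa | cfg_changerGUI.py | split_cfg
-- ===== SOURCE A (Python) =====
-- def split_cfg(text):
--     list = []
--     prev = -1
--     for detected, val in enumerate(text):
--         if text[detected] == '\n':
--             list.append(text[prev+1:detected+1])
--             prev = detected
--     return list
-- ===== SOURCE B (Python) =====
-- def split_cfg(text):
--     return [p + '\n' for p in text.split('\n')[:-1]]
-- ===== Notes on version B (the rewrite author's own statement) =====
-- stated objective: simpler
-- what changed: Replaces the manual index scan with prev-pointer bookkeeping and repeated slicing by one str.split('\n'), dropping the trailing remainder and re-appending '\n' to each kept piece.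
import Mathlib
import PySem

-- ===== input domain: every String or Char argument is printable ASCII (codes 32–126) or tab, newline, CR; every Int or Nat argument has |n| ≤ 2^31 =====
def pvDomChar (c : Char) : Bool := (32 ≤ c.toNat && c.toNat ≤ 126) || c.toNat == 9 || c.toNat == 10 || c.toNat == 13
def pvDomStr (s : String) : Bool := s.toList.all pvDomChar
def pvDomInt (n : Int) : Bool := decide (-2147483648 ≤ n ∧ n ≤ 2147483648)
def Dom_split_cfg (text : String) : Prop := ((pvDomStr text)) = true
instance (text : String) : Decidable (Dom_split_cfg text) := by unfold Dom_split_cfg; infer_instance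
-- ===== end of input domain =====

-- B replaces A's index scan (prev pointer + repeated slicing) by split('\n'), dropping
-- the trailing remainder and re-appending '\n' to each piece; objective: simpler.

-- ===== PORT A =====
-- literal port of A: fold over enumerate(text) with state (list, prev); text[detected]
-- and the slice text[prev+1:detected+1] via PySem.
def split_cfg (text : String) : List String :=
  ((PySem.List.enumerate text.toList 0).foldl
    (fun (st : List String × Int) dv =>
      if PySem.List.pyGet? text.toList dv.1 = some '\n' then
        (st.1 ++ [String.ofList (PySem.List.slice text.toList (some (st.2 + 1)) (some (dv.1 + 1)))], dv.1)
      else st)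
    ([], -1)).1

-- ===== PORT B =====
-- literal port of Source B: text.split('\n') (sep ≠ "", so Chars.splitOn), [:-1] as a Python
-- slice, then p + '\n' on each kept piece.
def split_cfg_alt (text : String) : List String :=
  (PySem.List.slice (PySem.Chars.splitOn text.toList ['\n']) none (some (-1))).map
    (fun p => String.ofList (p ++ ['\n']))

-- ===== PRECONDITION & SPEC =====
def Spec_split_cfg (text : String) (out : List String) : Prop := out = split_cfg_alt text
instance (text : String) (out : List String) : Decidable (Spec_split_cfg text out) := by unfold Spec_split_cfg; infer_instance

-- ===== CLAIM (what is proved, stated in full; the proofs are below) =====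
def Claim_equal_split_cfg : Prop := ∀ (text : String), Dom_split_cfg text → Spec_split_cfg text (split_cfg text)

-- ===== LEMMAS AND PROOFS =====

-- proof-side spec: split a char list at '\n', accumulating the current piece reversed
def splitNl : List Char → List Char → List (List Char)
  | cur, [] => [cur.reverse]
  | cur, c :: rest => if c = '\n' then cur.reverse :: splitNl [] rest else splitNl (c :: cur) rest

theorem splitNl_ne_nil (cur l : List Char) : splitNl cur l ≠ [] := by
  induction l generalizing cur with
  | nil => simp [splitNl]
  | cons c rest ih => simp only [splitNl]; split <;> simp [ih]

theorem splitOn_go_eq (fuel : Nat) (l cur : List Char) (acc : List (List Char))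
    (h : l.length < fuel) :
    PySem.Chars.splitOn.go ['\n'] fuel l cur acc = acc.reverse ++ splitNl cur l := by
  induction fuel generalizing l cur acc with
  | zero => omega
  | succ fuel ih =>
    cases l with
    | nil => rw [PySem.Chars.splitOn.go.eq_def]; simp [splitNl]
    | cons c rest =>
      have hlt : rest.length < fuel := by simpa using Nat.lt_of_succ_lt_succ h
      rw [PySem.Chars.splitOn.go.eq_def]
      simp only []
      by_cases hc : c = '\n'
      · subst hc
        rw [show (['\n'].isPrefixOf ('\n' :: rest)) = true from by
            show (('\n' == '\n') && [].isPrefixOf rest) = true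
            rw [beq_self_eq_true]
            exact Bool.true_and _ ▸ rfl,
          if_pos rfl]
        show PySem.Chars.splitOn.go ['\n'] fuel rest [] (cur.reverse :: acc) = _
        rw [ih rest [] (cur.reverse :: acc) hlt]
        simp only [splitNl]
        simp
      · rw [show (['\n'].isPrefixOf (c :: rest)) = false from by
          show (('\n' == c) && [].isPrefixOf rest) = false
          rw [Bool.and_eq_false_iff]
          exact Or.inl (beq_eq_false_iff_ne.mpr (fun h => hc h.symm))]
        rw [if_neg (by simp)]
        rw [ih rest (c :: cur) acc hlt]
        simp only [splitNl]
        rw [if_neg hc]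

theorem splitOn_eq_splitNl (cs : List Char) :
    PySem.Chars.splitOn cs ['\n'] = splitNl [] cs := by
  unfold PySem.Chars.splitOn
  rw [splitOn_go_eq _ _ _ _ (by omega)]
  simp

-- the invariant of A's fold: processing the suffix cs.drop k with prev = p - 1, where
-- p ≤ k is the index just after the last seen newline
theorem split_cfg_loop (cs : List Char) (rest : List Char) (k p : Nat) (l : List String)
    (hrest : rest = cs.drop k) (hpk : p ≤ k) :
    ((PySem.List.enumerate rest (k : Int)).foldl
      (fun (st : List String × Int) dv =>
        if PySem.List.pyGet? cs dv.1 = some '\n' then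
          (st.1 ++ [String.ofList (PySem.List.slice cs (some (st.2 + 1)) (some (dv.1 + 1)))], dv.1)
        else st)
      (l, (p : Int) - 1)).1
    = l ++ (splitNl ((cs.drop p).take (k - p)).reverse rest).dropLast.map
        (fun q => String.ofList (q ++ ['\n'])) := by
  induction rest generalizing k p l with
  | nil => simp [splitNl, PySem.List.enumerate]
  | cons c rest ih =>
    have hk : k < cs.length := by
      by_contra hk
      have hnil : cs.drop k = [] := List.drop_eq_nil_of_le (by omega)
      rw [hnil] at hrest
      exact List.cons_ne_nil _ _ hrest
    have hrest' : rest = cs.drop (k + 1) := by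
      have := congrArg (List.drop 1) hrest
      simpa [List.drop_drop, Nat.add_comm] using this
    have hget : PySem.List.pyGet? cs (k : Int) = some c := by
      rw [PySem.List.pyGet?_natCast]
      have : cs[k]? = (cs.drop k).head? := by
        rw [List.head?_drop]
      rw [this, ← hrest]; rfl
    rw [PySem.List.enumerate_cons]
    simp only [List.foldl_cons, hget]
    by_cases hc : c = '\n'
    · rw [if_pos (by rw [hc])]
      have hcast : (k : Int) + 1 = ((k + 1 : Nat) : Int) := by push_cast; ring
      have hprev : (p : Int) - 1 + 1 = ((p : Nat) : Int) := by ring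
      rw [hprev, hcast]
      have hslice : PySem.List.slice cs (some ((p : Nat) : Int)) (some ((k + 1 : Nat) : Int))
          = (cs.drop p).take (k - p) ++ ['\n'] := by
        rw [PySem.List.slice_toNat cs (by positivity) (by positivity)]
        simp only [Int.toNat_natCast]
        have h1 : (k + 1) - p = (k - p) + 1 := by omega
        rw [h1, List.take_add_one]
        congr 1
        have : (cs.drop p)[k - p]? = (cs.drop k).head? := by
          rw [List.head?_drop, List.getElem?_drop]
          congr 1; omega
        rw [this, ← hrest]
        simp [hc]
      have hres := ih (k + 1) (k + 1) (l ++ [String.ofList ((cs.drop p).take (k - p) ++ ['\n'])])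
        hrest' (le_refl _)
      rw [hslice]
      have hk1 : ((k + 1 : Nat) : Int) = ((k + 1 : Nat) : Int) - 1 + 1 := by ring
      -- align the new prev value (k : Int) with (↑(k+1)) - 1
      have hprev2 : (k : Int) = ((k + 1 : Nat) : Int) - 1 := by push_cast; ring
      rw [hprev2, hres]
      simp only [Nat.sub_self, List.take_zero, List.reverse_nil, splitNl, if_pos hc,
        List.reverse_reverse]
      rw [List.dropLast_cons_of_ne_nil (splitNl_ne_nil [] rest)]
      simp
    · rw [if_neg (by simp [hc])]
      have hres := ih (k + 1) p l hrest' (by omega)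
      have hcast : (k : Int) + 1 = ((k + 1 : Nat) : Int) := by push_cast; ring
      rw [hcast, hres]
      congr 2
      have htake : (cs.drop p).take (k + 1 - p) = (cs.drop p).take (k - p) ++ [c] := by
        have h1 : (k + 1) - p = (k - p) + 1 := by omega
        rw [h1, List.take_add_one]
        congr 1
        have : (cs.drop p)[k - p]? = (cs.drop k).head? := by
          rw [List.head?_drop, List.getElem?_drop]
          congr 1; omega
        rw [this, ← hrest]; rfl
      rw [htake]
      simp [splitNl, hc]

-- ===== VERDICT (by name: the statement is the Claim_ definition above) =====
theorem split_cfg_spec : Claim_equal_split_cfg := by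
  intro text _
  unfold Spec_split_cfg split_cfg split_cfg_alt
  rw [splitOn_eq_splitNl, PySem.List.slice_to_neg_one]
  have h := split_cfg_loop text.toList text.toList 0 0 [] (by simp) (le_refl _)
  simpa using h
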